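-- pv_equiv track=rewrite | github.com/adminabhishek/fake-news-detector-ai-powered | retrieve.py | get_fallback_urls
-- ===== SOURCE A (Python) =====
-- def get_fallback_urls(query):
--     """
--     Smart fallback URLs based on query content with diverse trusted sources
--     """
--     query_lower = query.lower()
--
--     if any(word in query_lower for word in ['india', 'china', 'modi', 'xi']):
--         return [
--             "https://www.bbc.com/news/world/asia/india",
--             "https://www.aljazeera.com/where/india/",
--             "https://www.scmp.com/topics/india-china-relations",
--             "https://www.thehindu.com/news/national/",
--             "https://indianexpress.com/section/india/",
--             "https://www.ndtv.com/india",
--             "https://timesofindia.indiatimes.com/india",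
--             "https://www.dailymail.co.uk/indiahome/index.html"
--         ]
--     elif any(word in query_lower for word in ['ai', 'artificial', 'robot', 'automation']):
--         return [
--             "https://www.technologyreview.com/category/ai/",
--             "https://www.wired.com/category/ai/",
--             "https://www.theverge.com/ai-artificial-intelligence",
--             "https://www.nytimes.com/section/technology/ai",
--             "https://www.bbc.com/news/technology",
--             "https://www.cnet.com/tags/artificial-intelligence/",
--             "https://www.zdnet.com/topic/artificial-intelligence/",
--             "https://venturebeat.com/ai/"
--         ]
--     else:
--         return [
--             "https://www.bbc.com/news",
--             "https://www.aljazeera.com/",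
--             "https://www.theguardian.com/world",
--             "https://www.nytimes.com/",
--             "https://www.washingtonpost.com/",
--             "https://www.cnn.com/",
--             "https://www.npr.org/",
--             "https://www.reuters.com/"
--         ]
-- ===== SOURCE B (Python) =====
-- _TABLES = [
--     [  # 0: india/china group
--         "https://www.bbc.com/news/world/asia/india",
--         "https://www.aljazeera.com/where/india/",
--         "https://www.scmp.com/topics/india-china-relations",
--         "https://www.thehindu.com/news/national/",
--         "https://indianexpress.com/section/india/",
--         "https://www.ndtv.com/india",
--         "https://timesofindia.indiatimes.com/india",
--         "https://www.dailymail.co.uk/indiahome/index.html",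
--     ],
--     [  # 1: ai group
--         "https://www.technologyreview.com/category/ai/",
--         "https://www.wired.com/category/ai/",
--         "https://www.theverge.com/ai-artificial-intelligence",
--         "https://www.nytimes.com/section/technology/ai",
--         "https://www.bbc.com/news/technology",
--         "https://www.cnet.com/tags/artificial-intelligence/",
--         "https://www.zdnet.com/topic/artificial-intelligence/",
--         "https://venturebeat.com/ai/",
--     ],
--     [  # 2: default
--         "https://www.bbc.com/news",
--         "https://www.aljazeera.com/",
--         "https://www.theguardian.com/world",
--         "https://www.nytimes.com/",
--         "https://www.washingtonpost.com/",
--         "https://www.cnn.com/",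
--         "https://www.npr.org/",
--         "https://www.reuters.com/",
--     ],
-- ]
--
-- _G1 = ("india", "china", "modi", "xi")
-- _G2 = ("ai", "artificial", "robot", "automation")
--
--
-- def get_fallback_urls(query):
--     """Single left-to-right scan: classify what starts at each position of the
--     lowered query, keeping the best (lowest) group rank seen so far."""
--     q = query.lower()
--     rank = 2
--     for i in range(len(q)):
--         if q.startswith(_G1, i):
--             rank = 0
--             break
--         if rank == 2 and q.startswith(_G2, i):
--             rank = 1
--     return _TABLES[rank]
-- ===== Notes on version B (the rewrite author's own statement) =====
-- stated objective: alternative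
-- what changed: Instead of one substring-containment test per keyword (if/elif chain), B makes a single left-to-right scan over the lowered query, classifying the keyword group that starts at each position and keeping the best rank, then indexes a table of three URL lists by that rank.
import Mathlib
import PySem

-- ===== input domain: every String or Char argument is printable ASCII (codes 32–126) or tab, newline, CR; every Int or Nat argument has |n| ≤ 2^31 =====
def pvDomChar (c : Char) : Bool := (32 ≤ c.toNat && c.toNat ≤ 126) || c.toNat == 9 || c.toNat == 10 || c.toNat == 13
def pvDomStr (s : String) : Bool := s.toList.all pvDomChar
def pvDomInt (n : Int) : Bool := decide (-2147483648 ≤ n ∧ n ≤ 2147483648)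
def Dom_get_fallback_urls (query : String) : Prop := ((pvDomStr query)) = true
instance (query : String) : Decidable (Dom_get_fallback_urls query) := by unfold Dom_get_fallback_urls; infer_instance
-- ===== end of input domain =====

-- B replaces A's per-keyword containment tests (if/elif chain) by a single left-to-right
-- scan over the lowered query that classifies the keyword group starting at each position
-- and keeps the best rank; same URLs and ordering (objective: alternative).

-- ===== PORT A =====
def get_fallback_urls (query : String) : List String :=
  let query_lower := PySem.Str.lower query
  if ["india", "china", "modi", "xi"].any (fun word => PySem.Str.isIn word query_lower) then
    [ "https://www.bbc.com/news/world/asia/india",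
      "https://www.aljazeera.com/where/india/",
      "https://www.scmp.com/topics/india-china-relations",
      "https://www.thehindu.com/news/national/",
      "https://indianexpress.com/section/india/",
      "https://www.ndtv.com/india",
      "https://timesofindia.indiatimes.com/india",
      "https://www.dailymail.co.uk/indiahome/index.html" ]
  else if ["ai", "artificial", "robot", "automation"].any (fun word => PySem.Str.isIn word query_lower) then
    [ "https://www.technologyreview.com/category/ai/",
      "https://www.wired.com/category/ai/",
      "https://www.theverge.com/ai-artificial-intelligence",
      "https://www.nytimes.com/section/technology/ai",
      "https://www.bbc.com/news/technology",
      "https://www.cnet.com/tags/artificial-intelligence/",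
      "https://www.zdnet.com/topic/artificial-intelligence/",
      "https://venturebeat.com/ai/" ]
  else
    [ "https://www.bbc.com/news",
      "https://www.aljazeera.com/",
      "https://www.theguardian.com/world",
      "https://www.nytimes.com/",
      "https://www.washingtonpost.com/",
      "https://www.cnn.com/",
      "https://www.npr.org/",
      "https://www.reuters.com/" ]

-- ===== PORT B =====
-- _TABLES: the three URL lists, indexed by group rank
def pvTables : List (List String) :=
  [ [ "https://www.bbc.com/news/world/asia/india",
      "https://www.aljazeera.com/where/india/",
      "https://www.scmp.com/topics/india-china-relations",
      "https://www.thehindu.com/news/national/",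
      "https://indianexpress.com/section/india/",
      "https://www.ndtv.com/india",
      "https://timesofindia.indiatimes.com/india",
      "https://www.dailymail.co.uk/indiahome/index.html" ],
    [ "https://www.technologyreview.com/category/ai/",
      "https://www.wired.com/category/ai/",
      "https://www.theverge.com/ai-artificial-intelligence",
      "https://www.nytimes.com/section/technology/ai",
      "https://www.bbc.com/news/technology",
      "https://www.cnet.com/tags/artificial-intelligence/",
      "https://www.zdnet.com/topic/artificial-intelligence/",
      "https://venturebeat.com/ai/" ],
    [ "https://www.bbc.com/news",
      "https://www.aljazeera.com/",
      "https://www.theguardian.com/world",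
      "https://www.nytimes.com/",
      "https://www.washingtonpost.com/",
      "https://www.cnn.com/",
      "https://www.npr.org/",
      "https://www.reuters.com/" ] ]

def pvG1 : List (List Char) := [['i','n','d','i','a'], ['c','h','i','n','a'], ['m','o','d','i'], ['x','i']]
def pvG2 : List (List Char) := [['a','i'], ['a','r','t','i','f','i','c','i','a','l'], ['r','o','b','o','t'], ['a','u','t','o','m','a','t','i','o','n']]

-- the scan loop: at each position (tail of q) test 'q.startswith(_G1, i)' (break with rank 0)
-- then, if rank is still 2, 'q.startswith(_G2, i)' (rank becomes 1); at the end return rank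
def pvScan : List Char → Nat → Nat
  | [], rank => rank
  | c :: cs, rank =>
      if pvG1.any (fun w => w.isPrefixOf (c :: cs)) then 0
      else pvScan cs (if rank == 2 && pvG2.any (fun w => w.isPrefixOf (c :: cs)) then 1 else rank)

def get_fallback_urls_alt (query : String) : List String :=
  let q := PySem.Str.lower query
  pvTables.getD (pvScan q.toList 2) []

-- ===== PRECONDITION & SPEC =====
def Spec_get_fallback_urls (query : String) (out : List String) : Prop := out = get_fallback_urls_alt query
instance (query : String) (out : List String) : Decidable (Spec_get_fallback_urls query out) := by unfold Spec_get_fallback_urls; infer_instance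

-- ===== CLAIM =====
def Claim_equal_get_fallback_urls : Prop := ∀ (query : String), Dom_get_fallback_urls query → Spec_get_fallback_urls query (get_fallback_urls query)

-- ===== LEMMAS AND PROOFS =====

-- 'w occurs in c::cs' = 'w starts at position 0' or 'w occurs in cs'
theorem pvIsIn_cons (w : List Char) (c : Char) (cs : List Char) :
    PySem.Chars.isIn w (c :: cs) = (w.isPrefixOf (c :: cs) || PySem.Chars.isIn w cs) := by
  rw [Bool.eq_iff_iff]
  simp [PySem.Chars.isIn_iff_infix, List.infix_cons_iff, List.isPrefixOf_iff_prefix]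

theorem pvAny_cons (g : List (List Char)) (c : Char) (cs : List Char) :
    g.any (fun w => PySem.Chars.isIn w (c :: cs)) =
      (g.any (fun w => w.isPrefixOf (c :: cs)) || g.any (fun w => PySem.Chars.isIn w cs)) := by
  simp only [pvIsIn_cons]
  rw [Bool.eq_iff_iff]
  simp only [List.any_eq_true, Bool.or_eq_true]
  aesop

theorem pvScan_one (s : List Char) :
    pvScan s 1 = if pvG1.any (fun w => PySem.Chars.isIn w s) then 0 else 1 := by
  induction s with
  | nil => decide
  | cons c cs ih =>
      rw [pvScan, pvAny_cons]
      cases h1 : pvG1.any (fun w => w.isPrefixOf (c :: cs)) <;>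
        simp [ih]

theorem pvScan_two (s : List Char) :
    pvScan s 2 = if pvG1.any (fun w => PySem.Chars.isIn w s) then 0
      else if pvG2.any (fun w => PySem.Chars.isIn w s) then 1 else 2 := by
  induction s with
  | nil => decide
  | cons c cs ih =>
      rw [pvScan, pvAny_cons, pvAny_cons pvG2]
      cases h1 : pvG1.any (fun w => w.isPrefixOf (c :: cs))
      · cases h2 : pvG2.any (fun w => w.isPrefixOf (c :: cs)) <;>
          simp [ih, pvScan_one]
      · simp

-- ===== VERDICT =====
theorem get_fallback_urls_spec : Claim_equal_get_fallback_urls := by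
  intro query _
  unfold Spec_get_fallback_urls get_fallback_urls get_fallback_urls_alt
  simp only [pvScan_two, PySem.Str.isIn_eq, List.any_cons, List.any_nil, pvG1, pvG2, pvTables]
  split_ifs <;> simp_all
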